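-- pv_equiv track=rewrite | github.com/fernanda3lias/MC102-unicamp | susy/lab05/lab05domeuamor.py | ContadorMuitoFoda
-- ===== SOURCE A (Python) =====
-- def ContadorMuitoFoda(dado_1, limiteinferior, limitesuperior):
--     contador_yey = 0
--
--     for dado_2 in range(1,7):
--         for dado_3 in range(1,7):
--             for dado_4 in range(1,7):
--                 if (dado_1 != dado_2 and
--                     dado_1 != dado_3 and
--                     dado_1 != dado_4 and
--                     dado_2 != dado_3 and
--                     dado_2 != dado_4 and
--                     dado_3 != dado_4):
--                     sum = dado_1 + dado_2 + dado_3 + dado_4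
--                     if limiteinferior <= dado_1 + dado_2 + dado_3 + dado_4 <= limitesuperior:
--                         contador_yey += 1
--     return contador_yey
-- ===== SOURCE B (Python) =====
-- def ContadorMuitoFoda(dado_1, limiteinferior, limitesuperior):
--     # choose/skip recursion over the candidate faces; each unordered 3-set
--     # stands for 3! = 6 ordered (dado_2, dado_3, dado_4) triples of A's loops.
--     vals = [d for d in range(1, 7) if d != dado_1]
--
--     def count(lst, need, acc):
--         if need == 0:
--             return 1 if limiteinferior <= acc <= limitesuperior else 0
--         if not lst:
--             return 0
--         return count(lst[1:], need - 1, acc + lst[0]) + count(lst[1:], need, acc)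
--
--     return 6 * count(vals, 3, dado_1)
-- ===== Notes on version B (the rewrite author's own statement) =====
-- stated objective: alternative
-- what changed: Replaced A's 216-iteration triple nested loop over ordered (dado_2,dado_3,dado_4) tuples with pairwise-distinctness tests by a choose/skip recursion that counts unordered 3-element subsets of the five faces different from dado_1 and multiplies the count by 3! = 6.
import Mathlib
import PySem

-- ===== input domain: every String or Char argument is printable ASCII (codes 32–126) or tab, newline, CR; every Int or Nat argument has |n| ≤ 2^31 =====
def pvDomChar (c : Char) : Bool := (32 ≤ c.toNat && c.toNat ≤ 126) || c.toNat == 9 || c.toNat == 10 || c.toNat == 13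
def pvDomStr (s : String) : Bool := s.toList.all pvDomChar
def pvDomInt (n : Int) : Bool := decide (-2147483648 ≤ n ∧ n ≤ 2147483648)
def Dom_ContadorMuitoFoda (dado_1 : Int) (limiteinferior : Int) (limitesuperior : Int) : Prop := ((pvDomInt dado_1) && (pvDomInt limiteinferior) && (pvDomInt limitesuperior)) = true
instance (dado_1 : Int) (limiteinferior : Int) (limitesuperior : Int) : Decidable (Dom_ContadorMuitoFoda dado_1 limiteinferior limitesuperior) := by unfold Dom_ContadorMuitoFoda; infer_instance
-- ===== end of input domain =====

-- B replaces A's 216-iteration triple loop over ordered triples by a choose/skip recursion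
-- over the five faces ≠ dado_1, counting unordered 3-sets and multiplying by 3! = 6 (objective: alternative).
-- ===== PORT A =====
def ContadorMuitoFoda (dado_1 : Int) (limiteinferior : Int) (limitesuperior : Int) : Int :=
  (PySem.List.pyRange 1 7 1).foldl (fun c2 dado_2 =>
    (PySem.List.pyRange 1 7 1).foldl (fun c3 dado_3 =>
      (PySem.List.pyRange 1 7 1).foldl (fun c4 dado_4 =>
        if dado_1 ≠ dado_2 ∧ dado_1 ≠ dado_3 ∧ dado_1 ≠ dado_4 ∧
           dado_2 ≠ dado_3 ∧ dado_2 ≠ dado_4 ∧ dado_3 ≠ dado_4 then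
          if limiteinferior ≤ dado_1 + dado_2 + dado_3 + dado_4 ∧
             dado_1 + dado_2 + dado_3 + dado_4 ≤ limitesuperior then c4 + 1 else c4
        else c4) c3) c2) 0

-- ===== PORT B =====
def pvCountB (limiteinferior limitesuperior : Int) : List Int → Nat → Int → Int
  | _, 0, acc => if limiteinferior ≤ acc ∧ acc ≤ limitesuperior then 1 else 0
  | [], _ + 1, _ => 0
  | x :: xs, need + 1, acc =>
      pvCountB limiteinferior limitesuperior xs need (acc + x) +
      pvCountB limiteinferior limitesuperior xs (need + 1) acc

def ContadorMuitoFoda_alt (dado_1 : Int) (limiteinferior : Int) (limitesuperior : Int) : Int :=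
  let vals := (PySem.List.pyRange 1 7 1).filter (fun d => d ≠ dado_1)
  6 * pvCountB limiteinferior limitesuperior vals 3 dado_1

-- ===== PRECONDITION & SPEC =====
def Spec_ContadorMuitoFoda (dado_1 : Int) (limiteinferior : Int) (limitesuperior : Int) (out : Int) : Prop := out = ContadorMuitoFoda_alt dado_1 limiteinferior limitesuperior
instance (dado_1 : Int) (limiteinferior : Int) (limitesuperior : Int) (out : Int) : Decidable (Spec_ContadorMuitoFoda dado_1 limiteinferior limitesuperior out) := by unfold Spec_ContadorMuitoFoda; infer_instance

-- ===== CLAIM (what is proved, stated in full; the proofs are below) =====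
def Claim_equal_ContadorMuitoFoda : Prop := ∀ (dado_1 : Int) (limiteinferior : Int) (limitesuperior : Int), Dom_ContadorMuitoFoda dado_1 limiteinferior limitesuperior → Spec_ContadorMuitoFoda dado_1 limiteinferior limitesuperior (ContadorMuitoFoda dado_1 limiteinferior limitesuperior)

-- ===== LEMMAS AND PROOFS =====
-- the window indicator shared by the shape lemmas
def pvF (lo hi s : Int) : Int := if lo ≤ s ∧ s ≤ hi then 1 else 0

-- A as nested map/sum
theorem a_shape (d1 lo hi : Int) :
    ContadorMuitoFoda d1 lo hi =
      (([1,2,3,4,5,6] : List Int).map (fun d2 =>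
        (([1,2,3,4,5,6] : List Int).map (fun d3 =>
          (([1,2,3,4,5,6] : List Int).map (fun d4 =>
            if d1 ≠ d2 ∧ d1 ≠ d3 ∧ d1 ≠ d4 ∧ d2 ≠ d3 ∧ d2 ≠ d4 ∧ d3 ≠ d4 then
              pvF lo hi (d1 + d2 + d3 + d4) else 0)).sum)).sum)).sum := by
  unfold ContadorMuitoFoda
  rw [show PySem.List.pyRange 1 7 1 = [1,2,3,4,5,6] from by decide]
  have hin : ∀ (L : List Int) (c d2 d3 : Int),
      L.foldl (fun c4 d4 =>
        if d1 ≠ d2 ∧ d1 ≠ d3 ∧ d1 ≠ d4 ∧ d2 ≠ d3 ∧ d2 ≠ d4 ∧ d3 ≠ d4 then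
          if lo ≤ d1 + d2 + d3 + d4 ∧ d1 + d2 + d3 + d4 ≤ hi then c4 + 1 else c4
        else c4) c
      = c + (L.map (fun d4 =>
          if d1 ≠ d2 ∧ d1 ≠ d3 ∧ d1 ≠ d4 ∧ d2 ≠ d3 ∧ d2 ≠ d4 ∧ d3 ≠ d4 then
            pvF lo hi (d1 + d2 + d3 + d4) else 0)).sum := by
    intro L c d2 d3
    rw [PySem.List.foldl_congr_mem (g := fun c4 d4 => c4 +
        (if d1 ≠ d2 ∧ d1 ≠ d3 ∧ d1 ≠ d4 ∧ d2 ≠ d3 ∧ d2 ≠ d4 ∧ d3 ≠ d4 then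
          pvF lo hi (d1 + d2 + d3 + d4) else 0))]
    · exact PySem.List.foldl_add _ _ _
    · intro acc x _
      simp only [pvF]
      split_ifs <;> ring
  simp only [hin, PySem.List.foldl_add]
  ring


set_option maxHeartbeats 1000000 in
theorem pv_case1 (lo hi : Int) : ContadorMuitoFoda 1 lo hi = ContadorMuitoFoda_alt 1 lo hi := by
  rw [a_shape]
  unfold ContadorMuitoFoda_alt
  rw [show PySem.List.pyRange 1 7 1 = [1,2,3,4,5,6] from by decide]
  simp only [List.map_cons, List.map_nil, List.sum_cons, List.sum_nil, List.filter_cons,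
    List.filter_nil, pvCountB, pvF, Int.reduceEq, Int.reduceAdd, Int.reduceLE, reduceIte,
    decide_true, decide_false, ne_eq, ite_true, ite_false, and_true, true_and, and_false,
    false_and, not_false_eq_true, not_true_eq_false, add_zero, zero_add, decide_not,
    Bool.not_false, Bool.not_true, Bool.false_eq_true, eq_self_iff_true]
  ring_nf

set_option maxHeartbeats 1000000 in
theorem pv_case2 (lo hi : Int) : ContadorMuitoFoda 2 lo hi = ContadorMuitoFoda_alt 2 lo hi := by
  rw [a_shape]
  unfold ContadorMuitoFoda_alt
  rw [show PySem.List.pyRange 1 7 1 = [1,2,3,4,5,6] from by decide]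
  simp only [List.map_cons, List.map_nil, List.sum_cons, List.sum_nil, List.filter_cons,
    List.filter_nil, pvCountB, pvF, Int.reduceEq, Int.reduceAdd, Int.reduceLE, reduceIte,
    decide_true, decide_false, ne_eq, ite_true, ite_false, and_true, true_and, and_false,
    false_and, not_false_eq_true, not_true_eq_false, add_zero, zero_add, decide_not,
    Bool.not_false, Bool.not_true, Bool.false_eq_true, eq_self_iff_true]
  ring_nf

set_option maxHeartbeats 1000000 in
theorem pv_case3 (lo hi : Int) : ContadorMuitoFoda 3 lo hi = ContadorMuitoFoda_alt 3 lo hi := by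
  rw [a_shape]
  unfold ContadorMuitoFoda_alt
  rw [show PySem.List.pyRange 1 7 1 = [1,2,3,4,5,6] from by decide]
  simp only [List.map_cons, List.map_nil, List.sum_cons, List.sum_nil, List.filter_cons,
    List.filter_nil, pvCountB, pvF, Int.reduceEq, Int.reduceAdd, Int.reduceLE, reduceIte,
    decide_true, decide_false, ne_eq, ite_true, ite_false, and_true, true_and, and_false,
    false_and, not_false_eq_true, not_true_eq_false, add_zero, zero_add, decide_not,
    Bool.not_false, Bool.not_true, Bool.false_eq_true, eq_self_iff_true]
  ring_nf

set_option maxHeartbeats 1000000 in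
theorem pv_case4 (lo hi : Int) : ContadorMuitoFoda 4 lo hi = ContadorMuitoFoda_alt 4 lo hi := by
  rw [a_shape]
  unfold ContadorMuitoFoda_alt
  rw [show PySem.List.pyRange 1 7 1 = [1,2,3,4,5,6] from by decide]
  simp only [List.map_cons, List.map_nil, List.sum_cons, List.sum_nil, List.filter_cons,
    List.filter_nil, pvCountB, pvF, Int.reduceEq, Int.reduceAdd, Int.reduceLE, reduceIte,
    decide_true, decide_false, ne_eq, ite_true, ite_false, and_true, true_and, and_false,
    false_and, not_false_eq_true, not_true_eq_false, add_zero, zero_add, decide_not,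
    Bool.not_false, Bool.not_true, Bool.false_eq_true, eq_self_iff_true]
  ring_nf

set_option maxHeartbeats 1000000 in
theorem pv_case5 (lo hi : Int) : ContadorMuitoFoda 5 lo hi = ContadorMuitoFoda_alt 5 lo hi := by
  rw [a_shape]
  unfold ContadorMuitoFoda_alt
  rw [show PySem.List.pyRange 1 7 1 = [1,2,3,4,5,6] from by decide]
  simp only [List.map_cons, List.map_nil, List.sum_cons, List.sum_nil, List.filter_cons,
    List.filter_nil, pvCountB, pvF, Int.reduceEq, Int.reduceAdd, Int.reduceLE, reduceIte,
    decide_true, decide_false, ne_eq, ite_true, ite_false, and_true, true_and, and_false,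
    false_and, not_false_eq_true, not_true_eq_false, add_zero, zero_add, decide_not,
    Bool.not_false, Bool.not_true, Bool.false_eq_true, eq_self_iff_true]
  ring_nf

set_option maxHeartbeats 1000000 in
theorem pv_case6 (lo hi : Int) : ContadorMuitoFoda 6 lo hi = ContadorMuitoFoda_alt 6 lo hi := by
  rw [a_shape]
  unfold ContadorMuitoFoda_alt
  rw [show PySem.List.pyRange 1 7 1 = [1,2,3,4,5,6] from by decide]
  simp only [List.map_cons, List.map_nil, List.sum_cons, List.sum_nil, List.filter_cons,
    List.filter_nil, pvCountB, pvF, Int.reduceEq, Int.reduceAdd, Int.reduceLE, reduceIte,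
    decide_true, decide_false, ne_eq, ite_true, ite_false, and_true, true_and, and_false,
    false_and, not_false_eq_true, not_true_eq_false, add_zero, zero_add, decide_not,
    Bool.not_false, Bool.not_true, Bool.false_eq_true, eq_self_iff_true]
  ring_nf

set_option maxHeartbeats 1000000 in
theorem pv_case_out (d1 lo hi : Int) (h1 : d1 ≠ 1) (h2 : d1 ≠ 2) (h3 : d1 ≠ 3)
    (h4 : d1 ≠ 4) (h5 : d1 ≠ 5) (h6 : d1 ≠ 6) :
    ContadorMuitoFoda d1 lo hi = ContadorMuitoFoda_alt d1 lo hi := by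
  rw [a_shape]
  unfold ContadorMuitoFoda_alt
  rw [show PySem.List.pyRange 1 7 1 = [1,2,3,4,5,6] from by decide]
  simp only [List.map_cons, List.map_nil, List.sum_cons, List.sum_nil, List.filter_cons,
    List.filter_nil, pvCountB, pvF, Int.reduceEq, Int.reduceAdd, Int.reduceLE, reduceIte,
    decide_true, decide_false, ne_eq, ite_true, ite_false, and_true, true_and, and_false,
    false_and, not_false_eq_true, not_true_eq_false, add_zero, zero_add, decide_not,
    Bool.not_false, Bool.not_true, Bool.false_eq_true, eq_self_iff_true,
    h1, h2, h3, h4, h5, h6, Ne.symm h1, Ne.symm h2, Ne.symm h3, Ne.symm h4, Ne.symm h5,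
    Ne.symm h6, add_assoc]
  ring_nf

-- ===== VERDICT (by name: the statement is the Claim_ definition above) =====
theorem ContadorMuitoFoda_spec : Claim_equal_ContadorMuitoFoda := by
  intro d lo hi _
  unfold Spec_ContadorMuitoFoda
  by_cases h1 : d = 1
  · exact h1 ▸ pv_case1 lo hi
  by_cases h2 : d = 2
  · exact h2 ▸ pv_case2 lo hi
  by_cases h3 : d = 3
  · exact h3 ▸ pv_case3 lo hi
  by_cases h4 : d = 4
  · exact h4 ▸ pv_case4 lo hi
  by_cases h5 : d = 5
  · exact h5 ▸ pv_case5 lo hi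
  by_cases h6 : d = 6
  · exact h6 ▸ pv_case6 lo hi
  · exact pv_case_out d lo hi h1 h2 h3 h4 h5 h6
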